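-- pv_equiv track=rewrite | github.com/3shn/GEO-INFER | GEO-INFER-SEC/src/geo_infer_sec/core/digital_security.py | _check_compliance_status
-- ===== SOURCE A (Python) =====
-- from typing import Dict, List, Optional, Tuple, Any, Union, Set
--
-- def _check_compliance_status(vulnerabilities: List[Dict[str, Any]]) -> Dict[str, bool]:
--     """Check compliance status based on vulnerabilities."""
--     # Simplified compliance checking
--     high_severity_vulns = [v for v in vulnerabilities if v.get("severity") == "HIGH"]
--     critical_severity_vulns = [v for v in vulnerabilities if v.get("severity") == "CRITICAL"]
--
--     return {
--         "pci_dss": len(critical_severity_vulns) == 0,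
--         "iso_27001": len(high_severity_vulns) <= 2,
--         "nist": len(vulnerabilities) <= 10,
--         "sox": len(critical_severity_vulns) == 0 and len(high_severity_vulns) <= 1
--     }
-- ===== SOURCE B (Python) =====
-- def _check_compliance_status(vulnerabilities):
--     """Check compliance status based on vulnerabilities."""
--     # Threshold scan with saturating counters: the four booleans only depend on
--     # whether any CRITICAL exists, on min(3, #HIGH) and on min(11, len), so the
--     # scan saturates its counters and stops early once every threshold is crossed.
--     any_critical = False
--     high_sat = 0   # saturates at 3
--     total_sat = 0  # saturates at 11
--     for v in vulnerabilities:
--         if any_critical and high_sat >= 3 and total_sat >= 11: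
--             break  # all four answers already determined
--         sev = v.get("severity")
--         if sev == "CRITICAL":
--             any_critical = True
--         elif sev == "HIGH" and high_sat < 3:
--             high_sat += 1
--         if total_sat < 11:
--             total_sat += 1
--     return {
--         "pci_dss": not any_critical,
--         "iso_27001": high_sat <= 2,
--         "nist": total_sat <= 10,
--         "sox": not any_critical and high_sat <= 1,
--     }
-- ===== Notes on version B (the rewrite author's own statement) =====
-- stated objective: alternative
-- what changed: B replaces A's two filtered-list materializations by a single threshold scan with saturating counters (any-CRITICAL flag, HIGH capped at 3, length capped at 11) that terminates early once every threshold is crossed, since the four booleans depend only on those saturated values.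
import Mathlib
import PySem

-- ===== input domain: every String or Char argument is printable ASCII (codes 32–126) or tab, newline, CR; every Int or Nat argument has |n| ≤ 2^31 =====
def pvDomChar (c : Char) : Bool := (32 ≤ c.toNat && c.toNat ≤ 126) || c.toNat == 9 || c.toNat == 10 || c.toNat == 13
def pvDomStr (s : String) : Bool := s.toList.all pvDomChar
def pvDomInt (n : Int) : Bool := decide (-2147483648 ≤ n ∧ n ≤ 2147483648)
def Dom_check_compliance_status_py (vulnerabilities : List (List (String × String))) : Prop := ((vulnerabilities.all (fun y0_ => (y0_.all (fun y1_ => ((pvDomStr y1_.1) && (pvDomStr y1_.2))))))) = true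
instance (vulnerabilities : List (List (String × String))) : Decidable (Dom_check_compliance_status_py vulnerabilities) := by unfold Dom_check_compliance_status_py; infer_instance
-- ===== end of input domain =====

-- B replaces A's two filtered-list scans by one saturating-counter threshold scan with early exit (objective: alternative).

-- v.get("severity") on the association-list dict (first match), shared by both ports
def pvGetSeverity (v : List (String × String)) : Option String :=
  (PySem.Dict.mk v).get? "severity"

-- ===== PORT A =====
def check_compliance_status_py (vulnerabilities : List (List (String × String))) : List (String × Bool) :=
  let high_severity_vulns := vulnerabilities.filter (fun v => pvGetSeverity v == some "HIGH")
  let critical_severity_vulns := vulnerabilities.filter (fun v => pvGetSeverity v == some "CRITICAL")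
  [("pci_dss", critical_severity_vulns.length == 0),
   ("iso_27001", decide (high_severity_vulns.length ≤ 2)),
   ("nist", decide (vulnerabilities.length ≤ 10)),
   ("sox", critical_severity_vulns.length == 0 && decide (high_severity_vulns.length ≤ 1))]

-- ===== PORT B =====
-- the scan loop of Source B: saturating counters, early break once all thresholds are crossed
def pvAltLoop : List (List (String × String)) → Bool → Nat → Nat → Bool × Nat × Nat
  | [], any_critical, high_sat, total_sat => (any_critical, high_sat, total_sat)
  | v :: rest, any_critical, high_sat, total_sat =>
    if any_critical && decide (3 ≤ high_sat) && decide (11 ≤ total_sat) then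
      (any_critical, high_sat, total_sat)
    else
      let sev := pvGetSeverity v
      let st :=
        if sev == some "CRITICAL" then (true, high_sat)
        else if sev == some "HIGH" && decide (high_sat < 3) then (any_critical, high_sat + 1)
        else (any_critical, high_sat)
      let total_sat' := if total_sat < 11 then total_sat + 1 else total_sat
      pvAltLoop rest st.1 st.2 total_sat'

def check_compliance_status_py_alt (vulnerabilities : List (List (String × String))) : List (String × Bool) :=
  let st := pvAltLoop vulnerabilities false 0 0
  [("pci_dss", !st.1),
   ("iso_27001", decide (st.2.1 ≤ 2)),
   ("nist", decide (st.2.2 ≤ 10)),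
   ("sox", !st.1 && decide (st.2.1 ≤ 1))]

-- ===== PRECONDITION & SPEC =====
def Spec_check_compliance_status_py (vulnerabilities : List (List (String × String))) (out : List (String × Bool)) : Prop := out = check_compliance_status_py_alt vulnerabilities
instance (vulnerabilities : List (List (String × String))) (out : List (String × Bool)) : Decidable (Spec_check_compliance_status_py vulnerabilities out) := by unfold Spec_check_compliance_status_py; infer_instance

-- ===== CLAIM (what is proved, stated in full; the proofs are below) =====
def Claim_equal_check_compliance_status_py : Prop := ∀ (vulnerabilities : List (List (String × String))), Dom_check_compliance_status_py vulnerabilities → Spec_check_compliance_status_py vulnerabilities (check_compliance_status_py vulnerabilities)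

-- ===== LEMMAS AND PROOFS =====
-- the loop's final state, in closed form, given the saturation invariants
theorem pvAltLoop_closed (l : List (List (String × String))) :
    ∀ (crit : Bool) (high total : Nat), high ≤ 3 → total ≤ 11 →
    pvAltLoop l crit high total =
      ((crit || decide (0 < (l.filter (fun v => pvGetSeverity v == some "CRITICAL")).length)),
       min 3 (high + (l.filter (fun v => pvGetSeverity v == some "HIGH")).length),
       min 11 (total + l.length)) := by
  induction l with
  | nil =>
      intro crit high total hh ht
      rw [pvAltLoop]
      simp [Nat.min_eq_right hh, Nat.min_eq_right ht]
  | cons v rest ih =>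
      intro crit high total hh ht
      rw [pvAltLoop]
      by_cases hbrk : (crit && decide (3 ≤ high) && decide (11 ≤ total)) = true
      · rw [if_pos hbrk]
        have h1 : crit = true := by revert hbrk; cases crit <;> simp
        have h23 := hbrk
        simp only [Bool.and_eq_true, decide_eq_true_eq] at h23
        have h2 : high = 3 := by omega
        have h3 : total = 11 := by omega
        subst h1 h2 h3
        refine Prod.ext (by simp) (Prod.ext ?_ ?_)
        · show 3 = min 3 _ ; omega
        · show 11 = min 11 _ ; omega
      · rw [if_neg hbrk]
        simp only []
        by_cases hc : pvGetSeverity v = some "CRITICAL"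
        · have hcb : (pvGetSeverity v == some "CRITICAL") = true := by simp [hc]
          have hhb : (pvGetSeverity v == some "HIGH") = false := by simp [hc]
          rw [if_pos hcb, ih _ _ _ hh (by split <;> omega)]
          simp only [List.filter_cons, hcb, hhb, if_true, List.length_cons]
          refine Prod.ext (by simp) (Prod.ext (by rfl) ?_)
          show min 11 _ = min 11 (total + (rest.length + 1)); split <;> omega
        · have hcb : (pvGetSeverity v == some "CRITICAL") = false := by simpa using hc
          rw [if_neg (by simp [hcb])]
          by_cases hhg : (pvGetSeverity v == some "HIGH") = true
          · by_cases hlt : high < 3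
            · rw [if_pos (by simp [hhg, hlt]), ih _ _ _ (by omega) (by split <;> omega)]
              simp only [List.filter_cons, hcb, hhg, if_true, List.length_cons]
              refine Prod.ext (by rfl) (Prod.ext ?_ ?_)
              · show min 3 _ = min 3 _ ; omega
              · show min 11 _ = min 11 (total + (rest.length + 1)); split <;> omega
            · rw [if_neg (by simp [hlt]), ih _ _ _ hh (by split <;> omega)]
              simp only [List.filter_cons, hcb, hhg, if_true, List.length_cons]
              refine Prod.ext (by rfl) (Prod.ext ?_ ?_)
              · show min 3 _ = min 3 _ ; omega
              · show min 11 _ = min 11 (total + (rest.length + 1)); split <;> omega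
          · have hhb : (pvGetSeverity v == some "HIGH") = false := by
              revert hhg; cases (pvGetSeverity v == some "HIGH") <;> simp
            rw [if_neg (by simp [hhb]), ih _ _ _ hh (by split <;> omega)]
            simp only [List.filter_cons, hcb, hhb, List.length_cons]
            refine Prod.ext (by rfl) (Prod.ext (by rfl) ?_)
            show min 11 _ = min 11 (total + (rest.length + 1)); split <;> omega

-- ===== VERDICT (by name: the statement is the Claim_ definition above) =====
theorem check_compliance_status_py_spec : Claim_equal_check_compliance_status_py := by
  intro vulnerabilities _
  show check_compliance_status_py vulnerabilities = check_compliance_status_py_alt vulnerabilities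
  unfold check_compliance_status_py check_compliance_status_py_alt
  rw [pvAltLoop_closed vulnerabilities false 0 0 (by omega) (by omega)]
  simp only [Bool.false_or, Nat.zero_add]
  have hcrit : (!decide (0 < (vulnerabilities.filter (fun v => pvGetSeverity v == some "CRITICAL")).length))
      = ((vulnerabilities.filter (fun v => pvGetSeverity v == some "CRITICAL")).length == 0) := by
    cases h : decide (0 < (vulnerabilities.filter (fun v => pvGetSeverity v == some "CRITICAL")).length) <;>
      simp_all
  have hhigh2 : decide (min 3 (vulnerabilities.filter (fun v => pvGetSeverity v == some "HIGH")).length ≤ 2)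
      = decide ((vulnerabilities.filter (fun v => pvGetSeverity v == some "HIGH")).length ≤ 2) := by
    rw [decide_eq_decide]; omega
  have hhigh1 : decide (min 3 (vulnerabilities.filter (fun v => pvGetSeverity v == some "HIGH")).length ≤ 1)
      = decide ((vulnerabilities.filter (fun v => pvGetSeverity v == some "HIGH")).length ≤ 1) := by
    rw [decide_eq_decide]; omega
  have htot : decide (min 11 vulnerabilities.length ≤ 10) = decide (vulnerabilities.length ≤ 10) := by
    rw [decide_eq_decide]; omega
  rw [hcrit, hhigh2, hhigh1, htot]
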